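-- pv_equiv track=rewrite | github.com/stephane-delire/Memoire-implementation | cqa/sources/IsCertain.py | key_valuations
-- ===== SOURCE A (Python) =====
-- def is_variable(t):
--     """
--     Heuristique très simple : tout identifiant alphabétique en minuscules est
--     considéré comme une variable (x, y, p, …).  Tout le reste (1, 'A', 'PARIS')
--     est traité comme constante.
--     """
--     return isinstance(t, str) and t.isalpha() and t.islower()
--
-- def key_valuations(atom, db):
--     _, pred, pk_len, args = atom
--     key_positions = range(pk_len)
--     vals = []
--
--     for fact in db.get(pred, []):
--         theta = {}
--         ok = True
--         for idx in key_positions: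
--             t, c = args[idx], fact[idx]
--             if is_variable(t):
--                 if t in theta and theta[t] != c:
--                     ok = False
--                     break
--                 theta[t] = c
--             elif t != c:
--                 ok = False
--                 break
--         if ok:
--             vals.append(theta)
--     return vals
-- ===== SOURCE B (Python) =====
-- def is_variable(t):
--     return isinstance(t, str) and t.isalpha() and t.islower()
--
-- def key_valuations(atom, db):
--     _, pred, pk_len, args = atom
--     facts = db.get(pred, [])
--     if not facts:
--         return []
--     # index the key token structure once: constants and variable -> positions
--     consts = []
--     varpos = {}
--     for idx in range(pk_len):
--         t = args[idx]
--         if is_variable(t):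
--             varpos.setdefault(t, []).append(idx)
--         else:
--             consts.append((idx, t))
--     vals = []
--     for fact in facts:
--         if any(fact[i] != c for i, c in consts):
--             continue
--         theta = {}
--         ok = True
--         for v, ps in varpos.items():
--             c0 = fact[ps[0]]
--             if any(fact[p] != c0 for p in ps[1:]):
--                 ok = False
--                 break
--             theta[v] = c0
--         if ok:
--             vals.append(theta)
--     return vals
-- ===== Notes on version B (the rewrite author's own statement) =====
-- stated objective: alternative
-- what changed: B builds a one-time index of the key token structure (constant positions and a variable->positions map) before the fact loop, then checks each fact against that index, instead of re-classifying every key token and re-building a bindings dict position by position for every fact as A does.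
-- outside the precondition, e.g. on key_valuations(('q', 'R', 2, ['A']), {'R': [['B', 'C']]}): A returns [], B raises IndexError; on key_valuations(('q', 'R', 3, ['x', 'x', 'A']), {'R': [['B', 'C']]}): A returns [], B raises IndexError
import Mathlib
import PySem

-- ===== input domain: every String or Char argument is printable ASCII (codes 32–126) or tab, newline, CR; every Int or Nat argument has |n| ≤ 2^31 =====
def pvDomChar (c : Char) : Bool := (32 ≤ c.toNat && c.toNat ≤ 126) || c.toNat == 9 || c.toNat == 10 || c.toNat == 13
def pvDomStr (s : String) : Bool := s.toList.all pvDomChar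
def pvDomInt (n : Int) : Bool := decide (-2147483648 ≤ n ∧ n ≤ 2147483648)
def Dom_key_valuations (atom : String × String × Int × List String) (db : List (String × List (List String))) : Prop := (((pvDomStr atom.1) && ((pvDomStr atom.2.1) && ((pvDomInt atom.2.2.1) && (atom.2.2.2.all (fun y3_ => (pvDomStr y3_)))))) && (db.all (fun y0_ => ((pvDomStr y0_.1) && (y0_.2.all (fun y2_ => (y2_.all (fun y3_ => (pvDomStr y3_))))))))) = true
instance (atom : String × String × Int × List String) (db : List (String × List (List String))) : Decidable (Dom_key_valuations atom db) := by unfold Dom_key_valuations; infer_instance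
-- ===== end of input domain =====

-- B indexes the key-token structure (constant positions, variable -> positions) once before the
-- fact loop instead of re-classifying every key token for every fact (objective: alternative).

-- ===== PORT A =====
-- is_variable(t): t.isalpha() and t.islower().  islower() is only evaluated when isalpha() already
-- holds, and an ASCII alphabetic string is nonempty with every character cased, so there
-- islower() = "every character is lowercase" (exact on the stated ASCII domain).
def isVariable (t : String) : Bool :=
  PySem.Str.strIsalpha t && t.toList.all PySem.Chars.islower

-- the inner 'for idx in key_positions' loop of A, with its early break
def aScan (args fact : List String) :
    List Int → PySem.Dict String String → Bool × PySem.Dict String String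
  | [], theta => (true, theta)
  | i :: rest, theta =>
    match PySem.List.pyGet? args i, PySem.List.pyGet? fact i with
    | some t, some c =>
      if isVariable t then
        if theta.contains t && (theta.getD t "" != c) then (false, theta)
        else aScan args fact rest (theta.insert t c)
      else if t != c then (false, theta)
      else aScan args fact rest theta
    | _, _ => (false, theta)  -- IndexError (excluded by Pre_)

def key_valuations (atom : String × String × Int × List String)
    (db : List (String × List (List String))) : List (List (String × String)) :=
  let pred := atom.2.1
  let pk_len := atom.2.2.1
  let args := atom.2.2.2
  let keyPositions := PySem.List.pyRange 0 pk_len 1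
  ((PySem.Dict.mk db).getD pred []).foldl
    (fun vals fact =>
      let r := aScan args fact keyPositions PySem.Dict.empty
      if r.1 then vals ++ [r.2.items] else vals) []

-- ===== PORT B =====
-- one pass over range(pk_len): constant positions and variable -> list of positions
def bIndex (args : List String) (positions : List Int) :
    List (Int × String) × PySem.Dict String (List Int) :=
  positions.foldl
    (fun ci i =>
      match PySem.List.pyGet? args i with
      | some t =>
        if isVariable t then (ci.1, ci.2.modify t [] (· ++ [i]))  -- varpos.setdefault(t, []).append(idx)
        else (ci.1 ++ [(i, t)], ci.2)
      | none => ci)  -- IndexError (excluded by Pre_)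
    ([], PySem.Dict.empty)

-- the 'for v, ps in varpos.items()' loop of B, with its early break
def bFactTheta (fact : List String) (varpos : PySem.Dict String (List Int)) :
    Bool × PySem.Dict String String :=
  varpos.items.foldl
    (fun st q =>
      if st.1 then
        match q.2 with
        | [] => (false, st.2)  -- unreachable: every positions list is built nonempty
        | p0 :: rest =>
          let c0 := PySem.List.pyGet? fact p0
          if rest.any (fun p => PySem.List.pyGet? fact p != c0) then (false, st.2)
          else (true, st.2.insert q.1 (c0.getD ""))  -- c0 = some _ under Pre_
      else st)
    (true, PySem.Dict.empty)

def key_valuations_alt (atom : String × String × Int × List String)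
    (db : List (String × List (List String))) : List (List (String × String)) :=
  let pred := atom.2.1
  let pk_len := atom.2.2.1
  let args := atom.2.2.2
  let facts := (PySem.Dict.mk db).getD pred []
  if facts.isEmpty then []
  else
    let ci := bIndex args (PySem.List.pyRange 0 pk_len 1)
    facts.foldl
      (fun vals fact =>
        if ci.1.any (fun p => PySem.List.pyGet? fact p.1 != some p.2) then vals
        else
          let r := bFactTheta fact ci.2
          if r.1 then vals ++ [r.2.items] else vals)
      []

-- ===== PRECONDITION & SPEC =====
-- Pre_ excludes inputs on which, with matching facts present, pk_len exceeds the length of args or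
-- of some matching fact: there B's eager index build / whole-key checks raise IndexError, while A
-- raises IndexError too unless an early mismatch break happens to stop it first (see cites).
def Pre_key_valuations (atom : String × String × Int × List String)
    (db : List (String × List (List String))) : Prop :=
  ((PySem.Dict.mk db).getD atom.2.1 []) ≠ [] →
    (atom.2.2.1 ≤ (atom.2.2.2.length : Int) ∧
     ∀ fact ∈ (PySem.Dict.mk db).getD atom.2.1 [], atom.2.2.1 ≤ (fact.length : Int))
instance (atom : String × String × Int × List String) (db : List (String × List (List String))) : Decidable (Pre_key_valuations atom db) := by unfold Pre_key_valuations; infer_instance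

def pvWitness_key_valuations :
    (String × String × Int × List String) × (List (String × List (List String))) :=
  (("q", "R", 1, ["x"]), [("R", [["A"]])])

def Spec_key_valuations (atom : String × String × Int × List String) (db : List (String × List (List String))) (out : List (List (String × String))) : Prop := out = key_valuations_alt atom db
instance (atom : String × String × Int × List String) (db : List (String × List (List String))) (out : List (List (String × String))) : Decidable (Spec_key_valuations atom db out) := by unfold Spec_key_valuations; infer_instance

-- ===== CLAIM (what is proved, stated in full; the proofs are below) =====
def Claim_equal_key_valuations : Prop := ∀ (atom : String × String × Int × List String) (db : List (String × List (List String))), Dom_key_valuations atom db → Pre_key_valuations atom db → Spec_key_valuations atom db (key_valuations atom db)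

-- ===== LEMMAS AND PROOFS =====

-- proof-side abbreviations: token at a key position, fact value at a key position
def tokA (args : List String) (j : Nat) : String := args.getD j ""
def fvalF (fact : List String) (j : Nat) : String := fact.getD j ""

-- positions (< k) holding variable token t
def varOccs (args : List String) (t : String) (k : Nat) : List Nat :=
  (List.range k).filter (fun j => isVariable (tokA args j) && tokA args j == t)

-- the distinct variable tokens among positions < k, in first-occurrence order
def varListK (args : List String) (k : Nat) : List String :=
  PySem.Set.ofList (((List.range k).filter (fun j => isVariable (tokA args j))).map (tokA args))

-- fact value at t's first occurrence
def foValK (args fact : List String) (t : String) (k : Nat) : String :=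
  fvalF fact ((varOccs args t k).headD 0)

def thetaSpec (args fact : List String) (k : Nat) : List (String × String) :=
  (varListK args k).map (fun t => (t, foValK args fact t k))

-- the matching condition both programs decide
def okUpto (args fact : List String) (k : Nat) : Prop :=
  (∀ j, j < k → ¬ (isVariable (tokA args j) = true) → tokA args j = fvalF fact j) ∧
  (∀ j1, j1 < k → ∀ j2, j2 < k → isVariable (tokA args j1) = true →
     tokA args j1 = tokA args j2 → fvalF fact j1 = fvalF fact j2)

def posL (k : Nat) : List Int := (List.range k).map (fun (j : Nat) => (j : Int))

def groupOK (fact : List String) (ps : List Int) : Bool :=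
  match ps with
  | [] => false
  | p0 :: rest => !rest.any (fun p => PySem.List.pyGet? fact p != PySem.List.pyGet? fact p0)

lemma posL_succ (k : Nat) : posL (k + 1) = posL k ++ [(k : Int)] := by
  simp [posL, List.range_succ]

lemma range_eq (n : Int) : PySem.List.pyRange 0 n 1 = posL n.toNat := by
  rcases le_or_gt 0 n with h | h
  · have := PySem.List.pyRange_zero_natCast n.toNat
    rw [Int.toNat_of_nonneg h] at this
    exact this
  · have hn : n.toNat = 0 := Int.toNat_of_nonpos h.le
    rw [hn]
    simp [PySem.List.pyRange, posL]
    omega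

lemma aScan_append_false (args fact : List String) (l l2 : List Int)
    (θ θ' : PySem.Dict String String) (h : aScan args fact l θ = (false, θ')) :
    aScan args fact (l ++ l2) θ = (false, θ') := by
  induction l generalizing θ with
  | nil => simp [aScan] at h
  | cons j rest ih =>
    rw [List.cons_append]
    simp only [aScan] at h ⊢
    rcases hA : PySem.List.pyGet? args j with _ | t <;>
      rcases hF : PySem.List.pyGet? fact j with _ | c <;>
      simp only [hA, hF] at h ⊢ <;> try exact h
    split_ifs at h ⊢ <;> first | exact h | exact ih _ h

lemma aScan_append_true (args fact : List String) (l l2 : List Int)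
    (θ θ' : PySem.Dict String String) (h : aScan args fact l θ = (true, θ')) :
    aScan args fact (l ++ l2) θ = aScan args fact l2 θ' := by
  induction l generalizing θ with
  | nil => simp [aScan] at h; simp [h]
  | cons j rest ih =>
    rw [List.cons_append]
    simp only [aScan] at h ⊢
    rcases hA : PySem.List.pyGet? args j with _ | t <;>
      rcases hF : PySem.List.pyGet? fact j with _ | c <;>
      simp only [hA, hF] at h ⊢
    · exact absurd h (by simp)
    · exact absurd h (by simp)
    · exact absurd h (by simp)
    · split_ifs at h ⊢ <;> first | exact absurd h (by simp) | exact ih _ h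

lemma pyGet?_at (xs : List String) (k : Nat) (h : k < xs.length) :
    PySem.List.pyGet? xs (k : Int) = some (xs.getD k "") := by
  rw [PySem.List.pyGet?_natCast, List.getElem?_eq_getElem h, List.getD_eq_getElem _ _ h]

lemma varOccs_succ (args : List String) (t : String) (k : Nat) :
    varOccs args t (k + 1) =
      varOccs args t k ++
        (if isVariable (tokA args k) && tokA args k == t then [k] else []) := by
  simp only [varOccs, List.range_succ, List.filter_append, List.filter_singleton]
  rcases h : (isVariable (tokA args k) && tokA args k == t) with _ | _ <;> simp [h]

lemma setOfList_append_one (xs : List String) (x : String) :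
    PySem.Set.ofList (xs ++ [x]) = PySem.Set.add (PySem.Set.ofList xs) x := by
  rw [PySem.Set.ofList_eq_foldl, PySem.Set.ofList_eq_foldl, List.foldl_append]
  rfl

lemma setAdd_of_mem (s : List String) (x : String) (h : x ∈ s) :
    PySem.Set.add s x = s := by
  simp [PySem.Set.add, PySem.Set.contains, h]

lemma setAdd_of_not_mem (s : List String) (x : String) (h : x ∉ s) :
    PySem.Set.add s x = s ++ [x] := by
  simp [PySem.Set.add, PySem.Set.contains, h]

lemma varListK_succ (args : List String) (k : Nat) :
    varListK args (k + 1) =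
      if isVariable (tokA args k) then PySem.Set.add (varListK args k) (tokA args k)
      else varListK args k := by
  simp only [varListK, List.range_succ, List.filter_append, List.filter_singleton,
    List.map_append]
  rcases Bool.eq_false_or_eq_true (isVariable (tokA args k)) with hh | hh <;>
    simp [hh, setOfList_append_one]

lemma mem_varListK (args : List String) (t : String) (k : Nat) :
    t ∈ varListK args k ↔ ∃ j, j < k ∧ isVariable (tokA args j) = true ∧ tokA args j = t := by
  simp [varListK, PySem.Set.mem_ofList, List.mem_filter, List.mem_range]
  constructor
  · rintro ⟨j, ⟨hj, hv⟩, ht⟩; exact ⟨j, hj, hv, ht⟩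
  · rintro ⟨j, hj, hv, ht⟩; exact ⟨j, ⟨hj, hv⟩, ht⟩

lemma mem_varOccs (args : List String) (t : String) (j k : Nat) :
    j ∈ varOccs args t k ↔ j < k ∧ isVariable (tokA args j) = true ∧ tokA args j = t := by
  simp [varOccs, List.mem_filter, List.mem_range]

lemma varOccs_ne_nil (args : List String) (t : String) (k : Nat)
    (h : t ∈ varListK args k) : varOccs args t k ≠ [] := by
  rcases (mem_varListK args t k).1 h with ⟨j, hj, hv, ht⟩
  intro hnil
  exact absurd ((mem_varOccs args t j k).2 ⟨hj, hv, ht⟩) (by simp [hnil])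

lemma headD_mem_varOccs (args : List String) (t : String) (k : Nat)
    (h : t ∈ varListK args k) : (varOccs args t k).headD 0 ∈ varOccs args t k := by
  rcases List.exists_cons_of_ne_nil (varOccs_ne_nil args t k h) with ⟨a, l, hal⟩
  simp [hal]

lemma okUpto_zero (args fact : List String) : okUpto args fact 0 := by
  constructor <;> intro j hj <;> omega

lemma okUpto_mono (args fact : List String) (k : Nat) :
    okUpto args fact (k + 1) → okUpto args fact k := by
  rintro ⟨h1, h2⟩
  exact ⟨fun j hj => h1 j (by omega), fun j1 hj1 j2 hj2 => h2 j1 (by omega) j2 (by omega)⟩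

lemma okUpto_succ_const (args fact : List String) (k : Nat)
    (hnv : ¬ (isVariable (tokA args k) = true)) :
    okUpto args fact (k + 1) ↔ okUpto args fact k ∧ tokA args k = fvalF fact k := by
  constructor
  · intro h
    exact ⟨okUpto_mono args fact k h, h.1 k (by omega) hnv⟩
  · rintro ⟨⟨h1, h2⟩, he⟩
    constructor
    · intro j hj hnvj
      rcases Nat.lt_succ_iff_lt_or_eq.1 hj with hj' | rfl
      · exact h1 j hj' hnvj
      · exact he
    · intro j1 hj1 j2 hj2 hv1 heq
      rcases Nat.lt_succ_iff_lt_or_eq.1 hj1 with hj1' | rfl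
      · rcases Nat.lt_succ_iff_lt_or_eq.1 hj2 with hj2' | rfl
        · exact h2 j1 hj1' j2 hj2' hv1 heq
        · exact absurd (heq ▸ hv1) hnv
      · exact absurd hv1 hnv

lemma okUpto_succ_var_mem (args fact : List String) (k : Nat)
    (hv : isVariable (tokA args k) = true) (hm : tokA args k ∈ varListK args k) :
    okUpto args fact (k + 1) ↔
      okUpto args fact k ∧ foValK args fact (tokA args k) k = fvalF fact k := by
  have hp0 := headD_mem_varOccs args (tokA args k) k hm
  rw [mem_varOccs] at hp0
  obtain ⟨hp0k, hp0v, hp0t⟩ := hp0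
  constructor
  · intro h
    refine ⟨okUpto_mono args fact k h, ?_⟩
    exact h.2 _ (by omega) k (by omega) hp0v hp0t
  · rintro ⟨⟨h1, h2⟩, he⟩
    constructor
    · intro j hj hnvj
      rcases Nat.lt_succ_iff_lt_or_eq.1 hj with hj' | rfl
      · exact h1 j hj' hnvj
      · exact absurd hv hnvj
    · intro j1 hj1 j2 hj2 hv1 heq
      rcases Nat.lt_succ_iff_lt_or_eq.1 hj1 with hj1' | hje1
      · rcases Nat.lt_succ_iff_lt_or_eq.1 hj2 with hj2' | hje2
        · exact h2 j1 hj1' j2 hj2' hv1 heq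
        · replace hje2 := hje2.symm; subst hje2
          have : fvalF fact j1 = foValK args fact (tokA args k) k := by
            exact h2 j1 hj1' _ hp0k hv1 (by rw [heq, hp0t])
          rw [this, he]
      · replace hje1 := hje1.symm; subst hje1
        rcases Nat.lt_succ_iff_lt_or_eq.1 hj2 with hj2' | hje2
        · have : fvalF fact j2 = foValK args fact (tokA args k) k := by
            refine h2 j2 hj2' _ hp0k (by rw [← heq]; exact hv1) (by rw [← heq, hp0t])
          rw [this, he]
        · replace hje2 := hje2.symm; subst hje2; rfl

lemma okUpto_succ_var_fresh (args fact : List String) (k : Nat)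
    (hv : isVariable (tokA args k) = true) (hm : tokA args k ∉ varListK args k) :
    okUpto args fact (k + 1) ↔ okUpto args fact k := by
  constructor
  · exact okUpto_mono args fact k
  · rintro ⟨h1, h2⟩
    constructor
    · intro j hj hnvj
      rcases Nat.lt_succ_iff_lt_or_eq.1 hj with hj' | rfl
      · exact h1 j hj' hnvj
      · exact absurd hv hnvj
    · intro j1 hj1 j2 hj2 hv1 heq
      rcases Nat.lt_succ_iff_lt_or_eq.1 hj1 with hj1' | hje1
      · rcases Nat.lt_succ_iff_lt_or_eq.1 hj2 with hj2' | hje2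
        · exact h2 j1 hj1' j2 hj2' hv1 heq
        · replace hje2 := hje2.symm; subst hje2
          exact absurd ((mem_varListK args (tokA args k) k).2 ⟨j1, hj1', hv1, heq⟩) hm
      · replace hje1 := hje1.symm; subst hje1
        rcases Nat.lt_succ_iff_lt_or_eq.1 hj2 with hj2' | hje2
        · exact absurd ((mem_varListK args (tokA args k) k).2
            ⟨j2, hj2', heq ▸ hv1, heq.symm⟩) hm
        · replace hje2 := hje2.symm; subst hje2; rfl

lemma foValK_succ_of_ne (args fact : List String) (t : String) (k : Nat)
    (h : ¬(isVariable (tokA args k) = true ∧ tokA args k = t)) :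
    foValK args fact t (k + 1) = foValK args fact t k := by
  have : varOccs args t (k + 1) = varOccs args t k := by
    rw [varOccs_succ]
    have hb : (isVariable (tokA args k) && tokA args k == t) = false := by
      rcases Bool.eq_false_or_eq_true (isVariable (tokA args k)) with hh | hh
      · simp only [hh, Bool.true_and, beq_eq_false_iff_ne, ne_eq]
        intro he; exact h ⟨hh, he⟩
      · simp [hh]
    simp [hb]
  rw [foValK, this, foValK]

lemma thetaSpec_succ_const (args fact : List String) (k : Nat)
    (hnv : ¬ (isVariable (tokA args k) = true)) :
    thetaSpec args fact (k + 1) = thetaSpec args fact k := by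
  have hl := varListK_succ args k
  rw [if_neg hnv] at hl
  rw [thetaSpec, thetaSpec, hl]
  exact List.map_congr_left fun t _ => by
    rw [foValK_succ_of_ne args fact t k (fun hc => hnv hc.1)]

lemma foValK_succ_of_eq_mem (args fact : List String) (k : Nat)
    (hv : isVariable (tokA args k) = true) (hm : tokA args k ∈ varListK args k) :
    foValK args fact (tokA args k) (k + 1) = foValK args fact (tokA args k) k := by
  have hocc := varOccs_succ args (tokA args k) k
  rw [if_pos (by simp [hv])] at hocc
  rcases List.exists_cons_of_ne_nil (varOccs_ne_nil args (tokA args k) k hm) with ⟨a, l, hal⟩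
  rw [foValK, foValK, hocc, hal]
  rfl

lemma thetaSpec_succ_var_mem (args fact : List String) (k : Nat)
    (hv : isVariable (tokA args k) = true) (hm : tokA args k ∈ varListK args k) :
    thetaSpec args fact (k + 1) = thetaSpec args fact k := by
  have hl := varListK_succ args k
  rw [if_pos hv, setAdd_of_mem _ _ hm] at hl
  rw [thetaSpec, thetaSpec, hl]
  refine List.map_congr_left fun t _ => ?_
  by_cases ht : tokA args k = t
  · rw [← ht, foValK_succ_of_eq_mem args fact k hv hm]
  · rw [foValK_succ_of_ne args fact t k (fun hc => ht hc.2)]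

lemma varOccs_eq_nil_of_fresh (args : List String) (k : Nat)
    (hm : tokA args k ∉ varListK args k) : varOccs args (tokA args k) k = [] := by
  rw [List.eq_nil_iff_forall_not_mem]
  intro j hj
  rw [mem_varOccs] at hj
  exact hm ((mem_varListK args (tokA args k) k).2 ⟨j, hj.1, hj.2.1, hj.2.2⟩)

lemma thetaSpec_succ_var_fresh (args fact : List String) (k : Nat)
    (hv : isVariable (tokA args k) = true) (hm : tokA args k ∉ varListK args k) :
    thetaSpec args fact (k + 1) = thetaSpec args fact k ++ [(tokA args k, fvalF fact k)] := by
  have hl := varListK_succ args k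
  rw [if_pos hv, setAdd_of_not_mem _ _ hm] at hl
  rw [thetaSpec, thetaSpec, hl, List.map_append]
  congr 1
  · refine List.map_congr_left fun t htm => ?_
    have hne : tokA args k ≠ t := fun he => hm (he ▸ htm)
    rw [foValK_succ_of_ne args fact t k (fun hc => hne hc.2)]
  · have hocc := varOccs_succ args (tokA args k) k
    rw [if_pos (by simp [hv]), varOccs_eq_nil_of_fresh args k hm] at hocc
    simp [foValK, hocc]

lemma theta_keys (args fact : List String) (k : Nat) (θ : PySem.Dict String String)
    (hitems : θ.items = thetaSpec args fact k) : θ.keys = varListK args k := by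
  simp only [PySem.Dict.keys, hitems, thetaSpec, List.map_map]
  simp [Function.comp_def]

lemma aChar (args fact : List String) (k : Nat)
    (hk : k ≤ args.length) (hf : k ≤ fact.length) :
    (((aScan args fact (posL k) PySem.Dict.empty).1 = true) ↔ okUpto args fact k)
  ∧ ((aScan args fact (posL k) PySem.Dict.empty).1 = true →
       (aScan args fact (posL k) PySem.Dict.empty).2.items = thetaSpec args fact k) := by
  revert hk hf
  induction k with
  | zero =>
    intro hk hf
    constructor
    · exact iff_of_true (by trivial) (okUpto_zero args fact)
    · intro _; rfl
  | succ k ih =>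
    intro hk hf
    obtain ⟨ih1, ih2⟩ := ih (by omega) (by omega)
    rw [posL_succ]
    rcases hr : aScan args fact (posL k) PySem.Dict.empty with ⟨ok, θ⟩
    rw [hr] at ih1 ih2
    cases ok with
    | false =>
      have hres := aScan_append_false args fact (posL k) [(k : Int)] _ _ hr
      rw [hres]
      have hnok : ¬ okUpto args fact k := by
        intro h; exact absurd (ih1.2 h) (by simp)
      constructor
      · exact iff_of_false (by simp) (fun h => hnok (okUpto_mono args fact k h))
      · intro h; exact absurd h (by simp)
    | true =>
      have hok : okUpto args fact k := ih1.1 rfl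
      have hitems : θ.items = thetaSpec args fact k := ih2 rfl
      have hres := aScan_append_true args fact (posL k) [(k : Int)] _ _ hr
      rw [hres]
      have hA := pyGet?_at args k (by omega)
      have hF := pyGet?_at fact k (by omega)
      have hkeys : θ.keys = varListK args k := theta_keys args fact k θ hitems
      have hnodup : θ.keys.Nodup := by rw [hkeys]; exact PySem.Set.nodup_ofList _
      simp only [aScan, hA, hF]
      by_cases hvar : isVariable (tokA args k) = true
      · rw [show args.getD k "" = tokA args k from rfl, if_pos hvar]
        by_cases hmem : tokA args k ∈ varListK args k
        · have hcont : θ.contains (tokA args k) = true :=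
            (PySem.Dict.contains_iff_mem_keys θ _).2 (hkeys ▸ hmem)
          have hgetD : θ.getD (tokA args k) "" = foValK args fact (tokA args k) k := by
            refine PySem.Dict.getD_of_mem_items θ ?_ hnodup ""
            rw [hitems, thetaSpec]
            exact List.mem_map.2 ⟨tokA args k, hmem, rfl⟩
          by_cases heq : foValK args fact (tokA args k) k = fvalF fact k
          · have hcond : (θ.contains (tokA args k) &&
                (θ.getD (tokA args k) "" != fact.getD k "")) = false := by
              rw [hcont, hgetD, heq]; simp [fvalF]
            rw [hcond]
            simp only [Bool.false_eq_true, if_false, aScan]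
            constructor
            · exact iff_of_true (by trivial)
                ((okUpto_succ_var_mem args fact k hvar hmem).2 ⟨hok, heq⟩)
            · intro _
              rw [PySem.Dict.items_insert_of_contains θ _ hcont, hitems,
                thetaSpec_succ_var_mem args fact k hvar hmem, thetaSpec, List.map_map]
              refine List.map_congr_left fun t _ => ?_
              by_cases ht : t = tokA args k
              · subst ht
                simp [Function.comp_def, heq, fvalF]
              · have hbe : (t == tokA args k) = false := by simp [ht]
                simp only [Function.comp_def, hbe, Bool.false_eq_true, if_false]
          · have hcond : (θ.contains (tokA args k) &&
                (θ.getD (tokA args k) "" != fact.getD k "")) = true := by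
              rw [hcont, hgetD]
              simp only [Bool.true_and, bne_iff_ne, ne_eq]
              exact heq
            rw [hcond]
            simp only [if_true]
            constructor
            · refine iff_of_false (by simp) (fun h => ?_)
              exact heq ((okUpto_succ_var_mem args fact k hvar hmem).1 h).2
            · intro h; exact absurd h (by simp)
        · have hcont : θ.contains (tokA args k) = false := by
            rcases Bool.eq_false_or_eq_true (θ.contains (tokA args k)) with hh | hh
            · exact absurd (hkeys ▸ (PySem.Dict.contains_iff_mem_keys θ _).1 hh) hmem
            · exact hh
          have hcond : (θ.contains (tokA args k) &&
              (θ.getD (tokA args k) "" != fact.getD k "")) = false := by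
            rw [hcont]; simp
          rw [hcond]
          simp only [Bool.false_eq_true, if_false, aScan]
          constructor
          · exact iff_of_true (by trivial)
              ((okUpto_succ_var_fresh args fact k hvar hmem).2 hok)
          · intro _
            rw [PySem.Dict.items_insert_of_not_contains θ _ hcont, hitems,
              thetaSpec_succ_var_fresh args fact k hvar hmem]
            rfl
      · rw [show args.getD k "" = tokA args k from rfl, if_neg hvar]
        by_cases heq : tokA args k = fvalF fact k
        · have hcond : (tokA args k != fact.getD k "") = false := by
            rw [heq]; simp [fvalF]
          rw [hcond]
          simp only [Bool.false_eq_true, if_false, aScan]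
          constructor
          · exact iff_of_true (by trivial)
              ((okUpto_succ_const args fact k hvar).2 ⟨hok, heq⟩)
          · intro _
            rw [hitems, thetaSpec_succ_const args fact k hvar]
        · have hcond : (tokA args k != fact.getD k "") = true := by
            simp only [bne_iff_ne, ne_eq]; exact heq
          rw [hcond]
          simp only [if_true]
          constructor
          · refine iff_of_false (by simp) (fun h => ?_)
            exact heq ((okUpto_succ_const args fact k hvar).1 h).2
          · intro h; exact absurd h (by simp)

lemma bIndex_append (args : List String) (l : List Int) (i : Int) :
    bIndex args (l ++ [i]) =
      (match PySem.List.pyGet? args i with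
       | some t =>
         if isVariable t then
           ((bIndex args l).1, (bIndex args l).2.modify t [] (· ++ [i]))
         else ((bIndex args l).1 ++ [(i, t)], (bIndex args l).2)
       | none => bIndex args l) := by
  rw [bIndex, bIndex, List.foldl_append, List.foldl_cons, List.foldl_nil]

lemma bIndexChar (args : List String) (k : Nat) (hk : k ≤ args.length) :
    (bIndex args (posL k)).1 =
      ((List.range k).filter (fun j => !isVariable (tokA args j))).map
        (fun (j : Nat) => ((j : Int), tokA args j))
  ∧ (bIndex args (posL k)).2.items =
      (varListK args k).map (fun t => (t, (varOccs args t k).map (fun (j : Nat) => (j : Int)))) := by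
  revert hk
  induction k with
  | zero => intro hk; exact ⟨rfl, rfl⟩
  | succ k ih =>
    intro hk
    obtain ⟨ih1, ih2⟩ := ih (by omega)
    rw [posL_succ, bIndex_append, pyGet?_at args k (by omega)]
    dsimp only
    have hkeys : (bIndex args (posL k)).2.keys = varListK args k := by
      simp only [PySem.Dict.keys, ih2, List.map_map]
      simp [Function.comp_def]
    have hnodup : (bIndex args (posL k)).2.keys.Nodup := by
      rw [hkeys]; exact PySem.Set.nodup_ofList _
    by_cases hvar : isVariable (tokA args k) = true
    · rw [show args.getD k "" = tokA args k from rfl, if_pos hvar]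
      constructor
      · rw [ih1]
        simp only [List.range_succ, List.filter_append, List.filter_singleton, hvar]
        simp
      · simp only [PySem.Dict.modify]
        by_cases hmem : tokA args k ∈ varListK args k
        · have hcont : (bIndex args (posL k)).2.contains (tokA args k) = true :=
            (PySem.Dict.contains_iff_mem_keys _ _).2 (hkeys ▸ hmem)
          have hgetD : (bIndex args (posL k)).2.getD (tokA args k) [] =
              (varOccs args (tokA args k) k).map (fun (j : Nat) => (j : Int)) := by
            refine PySem.Dict.getD_of_mem_items _ ?_ hnodup []
            rw [ih2]
            exact List.mem_map.2 ⟨tokA args k, hmem, rfl⟩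
          rw [PySem.Dict.items_insert_of_contains _ _ hcont, ih2, List.map_map]
          have hl := varListK_succ args k
          rw [if_pos hvar, setAdd_of_mem _ _ hmem] at hl
          rw [hl]
          refine List.map_congr_left fun t htm => ?_
          by_cases ht : t = tokA args k
          · subst ht
            have hocc := varOccs_succ args (tokA args k) k
            rw [if_pos (by simp [hvar])] at hocc
            simp [Function.comp_def, hgetD, hocc]
          · have hbe : (t == tokA args k) = false := by simp [ht]
            simp only [Function.comp_def, hbe, Bool.false_eq_true, if_false]
            have hocc2 : varOccs args t (k + 1) = varOccs args t k := by
              rw [varOccs_succ]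
              have hb2 : (isVariable (tokA args k) && tokA args k == t) = false := by
                simp [hvar]; intro hcc; exact absurd hcc.symm ht
              simp [hb2]
            rw [hocc2]
        · have hcont : (bIndex args (posL k)).2.contains (tokA args k) = false := by
            rcases Bool.eq_false_or_eq_true ((bIndex args (posL k)).2.contains (tokA args k))
              with hh | hh
            · exact absurd (hkeys ▸ (PySem.Dict.contains_iff_mem_keys _ _).1 hh) hmem
            · exact hh
          have hgetD : (bIndex args (posL k)).2.getD (tokA args k) [] = [] :=
            PySem.Dict.getD_of_not_contains _ _ hcont
          rw [PySem.Dict.items_insert_of_not_contains _ _ hcont, ih2, hgetD]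
          have hl := varListK_succ args k
          rw [if_pos hvar, setAdd_of_not_mem _ _ hmem] at hl
          rw [hl, List.map_append]
          congr 1
          · refine List.map_congr_left fun t htm => ?_
            have hne : tokA args k ≠ t := fun he => hmem (he ▸ htm)
            have hocc2 : varOccs args t (k + 1) = varOccs args t k := by
              rw [varOccs_succ]
              have hb2 : (isVariable (tokA args k) && tokA args k == t) = false := by
                simp [hvar]; exact hne
              simp [hb2]
            rw [hocc2]
          · have hocc := varOccs_succ args (tokA args k) k
            rw [if_pos (by simp [hvar]), varOccs_eq_nil_of_fresh args k hmem] at hocc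
            simp [hocc]
    · rw [show args.getD k "" = tokA args k from rfl, if_neg hvar]
      have hvf : isVariable (tokA args k) = false := by
        rcases Bool.eq_false_or_eq_true (isVariable (tokA args k)) with hh | hh
        · exact absurd hh hvar
        · exact hh
      constructor
      · rw [ih1]
        simp only [List.range_succ, List.filter_append, List.filter_singleton, hvf]
        simp
      · rw [ih2]
        have hl := varListK_succ args k
        rw [if_neg hvar] at hl
        rw [hl]
        refine List.map_congr_left fun t htm => ?_
        have hocc2 : varOccs args t (k + 1) = varOccs args t k := by
          rw [varOccs_succ]
          simp [hvf]
        rw [hocc2]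

def bStep (fact : List String) (st : Bool × PySem.Dict String String)
    (q : String × List Int) : Bool × PySem.Dict String String :=
  if st.1 then
    match q.2 with
    | [] => (false, st.2)
    | p0 :: rest =>
      let c0 := PySem.List.pyGet? fact p0
      if rest.any (fun p => PySem.List.pyGet? fact p != c0) then (false, st.2)
      else (true, st.2.insert q.1 (c0.getD ""))
  else st

lemma bFactTheta_eq (fact : List String) (vp : PySem.Dict String (List Int)) :
    bFactTheta fact vp = vp.items.foldl (bStep fact) (true, PySem.Dict.empty) := rfl

lemma bStep_true_eval (fact : List String) (θ : PySem.Dict String String)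
    (q : String × List Int) :
    bStep fact (true, θ) q =
      if groupOK fact q.2 then
        (true, θ.insert q.1 ((PySem.List.pyGet? fact (q.2.headD 0)).getD ""))
      else (false, θ) := by
  rcases q with ⟨t, ps⟩
  cases ps with
  | nil => simp [bStep, groupOK]
  | cons p0 rest =>
    simp only [bStep, groupOK]
    rcases h : rest.any (fun p => PySem.List.pyGet? fact p != PySem.List.pyGet? fact p0)
      with _ | _ <;> simp [h]

lemma bStep_foldl_false (fact : List String) (items : List (String × List Int))
    (θ : PySem.Dict String String) :
    items.foldl (bStep fact) (false, θ) = (false, θ) := by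
  induction items with
  | nil => rfl
  | cons q r ih =>
    rw [List.foldl_cons, show bStep fact (false, θ) q = (false, θ) from by simp [bStep], ih]

lemma bStep_foldl_true (fact : List String) (items : List (String × List Int))
    (θ : PySem.Dict String String) (h : ∀ q ∈ items, groupOK fact q.2 = true) :
    items.foldl (bStep fact) (true, θ) =
      (true, items.foldl
        (fun th q => th.insert q.1 ((PySem.List.pyGet? fact (q.2.headD 0)).getD "")) θ) := by
  induction items generalizing θ with
  | nil => rfl
  | cons q r ih =>
    rw [List.foldl_cons, List.foldl_cons, bStep_true_eval,
      if_pos (h q (by simp))]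
    exact ih _ (fun q' hq' => h q' (by simp [hq']))

lemma bStep_foldl_fst_false (fact : List String) (items : List (String × List Int))
    (θ : PySem.Dict String String) (h : ¬ ∀ q ∈ items, groupOK fact q.2 = true) :
    (items.foldl (bStep fact) (true, θ)).1 = false := by
  induction items generalizing θ with
  | nil => exact absurd (by simp) h
  | cons q r ih =>
    rw [List.foldl_cons, bStep_true_eval]
    by_cases hq : groupOK fact q.2 = true
    · rw [if_pos hq]
      exact ih _ (fun hall => h (by
        intro q' hq'
        rcases List.mem_cons.1 hq' with rfl | hq''
        · exact hq
        · exact hall q' hq''))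
    · rw [if_neg hq, bStep_foldl_false]

lemma groupOK_cast_iff (fact : List String) (l : List Nat) (hl : l ≠ [])
    (hsub : ∀ p ∈ l, p < fact.length) :
    groupOK fact (l.map (fun (j : Nat) => (j : Int))) = true ↔
      ∀ p ∈ l, fvalF fact p = fvalF fact (l.headD 0) := by
  rcases List.exists_cons_of_ne_nil hl with ⟨p0, rest, rfl⟩
  simp only [List.map_cons, groupOK, List.headD_cons, Bool.not_eq_eq_eq_not, Bool.not_true,
    List.any_eq_false]
  constructor
  · intro h p hp
    rcases List.mem_cons.1 hp with rfl | hp'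
    · rfl
    · have := h _ (List.mem_map.2 ⟨p, hp', rfl⟩)
      rw [pyGet?_at fact p (hsub p (by simp [hp'])),
        pyGet?_at fact p0 (hsub p0 (by simp))] at this
      simpa [fvalF] using this
  · intro h x hx
    rcases List.mem_map.1 hx with ⟨p, hp', rfl⟩
    rw [pyGet?_at fact p (hsub p (by simp [hp'])),
      pyGet?_at fact p0 (hsub p0 (by simp))]
    have := h p (by simp [hp'])
    simp only [fvalF] at this
    simp [← List.getD_eq_getElem?_getD, this]

lemma factEq (args fact : List String) (k : Nat)
    (hk : k ≤ args.length) (hf : k ≤ fact.length) :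
    (let r := aScan args fact (posL k) PySem.Dict.empty
     if r.1 then some r.2.items else none)
    =
    (let ci := bIndex args (posL k)
     if ci.1.any (fun p => PySem.List.pyGet? fact p.1 != some p.2) then none
     else
       let r := bFactTheta fact ci.2
       if r.1 then some r.2.items else none) := by
  obtain ⟨hc, hv⟩ := bIndexChar args k hk
  obtain ⟨a1, a2⟩ := aChar args fact k hk hf
  have hconst : ((bIndex args (posL k)).1.any
      (fun p => PySem.List.pyGet? fact p.1 != some p.2) = false) ↔
      (∀ j, j < k → ¬ (isVariable (tokA args j) = true) → tokA args j = fvalF fact j) := by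
    rw [hc, List.any_eq_false]
    constructor
    · intro h j hj hnv
      have hmem : ((j : Int), tokA args j) ∈
          ((List.range k).filter (fun j => !isVariable (tokA args j))).map
            (fun (j : Nat) => ((j : Int), tokA args j)) :=
        List.mem_map.2 ⟨j, List.mem_filter.2 ⟨List.mem_range.2 hj, by
          simp only [Bool.not_eq_eq_eq_not, Bool.not_true]
          rcases Bool.eq_false_or_eq_true (isVariable (tokA args j)) with hh | hh
          · exact absurd hh hnv
          · exact hh⟩, rfl⟩
      have hx := h _ hmem
      rw [pyGet?_at fact j (by omega)] at hx
      have : fvalF fact j = tokA args j := by simpa [fvalF] using hx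
      exact this.symm
    · intro h x hx
      rcases List.mem_map.1 hx with ⟨j, hjf, rfl⟩
      rcases List.mem_filter.1 hjf with ⟨hjr, hjv⟩
      have hj := List.mem_range.1 hjr
      rw [pyGet?_at fact j (by omega)]
      have hnv : ¬ (isVariable (tokA args j) = true) := by
        simp only [Bool.not_eq_eq_eq_not, Bool.not_true] at hjv
        simp [hjv]
      have := h j hj hnv
      simp [fvalF] at this ⊢
      simp [this]
  have hvars : (∀ q ∈ (bIndex args (posL k)).2.items, groupOK fact q.2 = true) ↔
      (∀ j1, j1 < k → ∀ j2, j2 < k → isVariable (tokA args j1) = true →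
         tokA args j1 = tokA args j2 → fvalF fact j1 = fvalF fact j2) := by
    rw [hv]
    constructor
    · intro h j1 hj1 j2 hj2 hv1 heq
      have hm1 : tokA args j1 ∈ varListK args k :=
        (mem_varListK args _ k).2 ⟨j1, hj1, hv1, rfl⟩
      have hq := h (tokA args j1, (varOccs args (tokA args j1) k).map (fun (j : Nat) => (j : Int)))
        (List.mem_map.2 ⟨tokA args j1, hm1, rfl⟩)
      rw [groupOK_cast_iff fact _ (varOccs_ne_nil args _ k hm1)
        (fun p hp => by have := (mem_varOccs args _ p k).1 hp; omega)] at hq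
      have e1 := hq j1 ((mem_varOccs args _ j1 k).2 ⟨hj1, hv1, rfl⟩)
      have e2 := hq j2 ((mem_varOccs args _ j2 k).2 ⟨hj2, heq ▸ hv1, heq.symm⟩)
      rw [e1, e2]
    · intro h q hq
      rcases List.mem_map.1 hq with ⟨t, htm, rfl⟩
      rw [groupOK_cast_iff fact _ (varOccs_ne_nil args t k htm)
        (fun p hp => by have := (mem_varOccs args t p k).1 hp; omega)]
      intro p hp
      obtain ⟨hpk, hpv, hpt⟩ := (mem_varOccs args t p k).1 hp
      have hh := headD_mem_varOccs args t k htm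
      obtain ⟨hhk, hhv, hht⟩ := (mem_varOccs args t _ k).1 hh
      exact h p hpk _ hhk hpv (by rw [hpt, hht])
  by_cases hok : okUpto args fact k
  · have hA1 : (aScan args fact (posL k) PySem.Dict.empty).1 = true := a1.2 hok
    have hAit := a2 hA1
    have hcf := hconst.2 hok.1
    have hgf := hvars.2 hok.2
    simp only [hA1, if_true, hcf, Bool.false_eq_true, if_false]
    rw [bFactTheta_eq, bStep_foldl_true fact _ _ hgf]
    simp only [if_true]
    congr 1
    rw [hAit]
    have hnodup : ((bIndex args (posL k)).2.items.map (fun q => q.1)).Nodup := by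
      rw [hv, List.map_map]
      have : ((varListK args k).map ((fun (q : String × List Int) => q.1) ∘
          (fun t => (t, (varOccs args t k).map (fun (j : Nat) => (j : Int)))))) =
          varListK args k := by
        simp [Function.comp_def]
      rw [this]
      exact PySem.Set.nodup_ofList _
    rw [PySem.Dict.items_foldl_insert_fresh _ _ _ _
      (fun q _ => PySem.Dict.contains_empty _) hnodup]
    rw [hv, List.map_map]
    simp only [PySem.Dict.items] at *
    rw [thetaSpec]
    refine (List.map_congr_left fun t htm => ?_).symm
    rcases List.exists_cons_of_ne_nil (varOccs_ne_nil args t k htm) with ⟨p0, rest, hocc⟩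
    have hp0 : p0 < fact.length := by
      have := (mem_varOccs args t p0 k).1 (by rw [hocc]; simp)
      omega
    simp only [Function.comp_def, hocc, List.map_cons, List.headD_cons,
      pyGet?_at fact p0 hp0, Option.getD_some, foValK, fvalF]
  · have hA1 : (aScan args fact (posL k) PySem.Dict.empty).1 = false := by
      rcases Bool.eq_false_or_eq_true (aScan args fact (posL k) PySem.Dict.empty).1 with hh | hh
      · exact absurd (a1.1 hh) hok
      · exact hh
    simp only [hA1, Bool.false_eq_true, if_false]
    rcases hcb : (bIndex args (posL k)).1.any
        (fun p => PySem.List.pyGet? fact p.1 != some p.2) with _ | _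
    · have hvf : ¬ ∀ q ∈ (bIndex args (posL k)).2.items, groupOK fact q.2 = true :=
        fun hall => hok ⟨hconst.1 hcb, hvars.1 hall⟩
      have hbf := bStep_foldl_fst_false fact _ (PySem.Dict.empty) hvf
      rw [← bFactTheta_eq] at hbf
      simp [hbf]
    · simp

-- ===== VERDICT (by name: the statement is the Claim_ definition above) =====
theorem key_valuations_spec : Claim_equal_key_valuations := by
  intro atom db _ hpre
  unfold Spec_key_valuations
  rcases atom with ⟨nm, pred, pkl, args⟩
  simp only [key_valuations, key_valuations_alt] at *
  rcases hfe : (PySem.Dict.mk db).getD pred [] with _ | ⟨f0, fr⟩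
  · simp
  · rw [← hfe]
    have hfne : (PySem.Dict.mk db).getD pred [] ≠ [] := by rw [hfe]; simp
    obtain ⟨hargs, hall⟩ := hpre hfne
    simp only at hargs hall
    have hk : pkl.toNat ≤ args.length := by omega
    rw [range_eq]
    have hie : ((PySem.Dict.mk db).getD pred []).isEmpty = false := by
      rw [hfe]; rfl
    rw [hie]
    simp only [Bool.false_eq_true, if_false]
    refine PySem.List.foldl_congr_mem _ _ _ _ (fun acc fact hmemf => ?_)
    have hff : pkl.toNat ≤ fact.length := by
      have := hall fact hmemf
      simp only at this
      omega
    have h := factEq args fact pkl.toNat hk hff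
    simp only at h
    rcases hA1 : (aScan args fact (posL pkl.toNat) PySem.Dict.empty).1 with _ | _
    · rw [hA1] at h
      simp only [Bool.false_eq_true, if_false] at h ⊢
      rcases hany : (bIndex args (posL pkl.toNat)).1.any
          (fun p => PySem.List.pyGet? fact p.1 != some p.2) with _ | _
      · rw [hany] at h
        simp only [Bool.false_eq_true, if_false] at h ⊢
        rcases hbf : (bFactTheta fact (bIndex args (posL pkl.toNat)).2).1 with _ | _
        · simp [hbf]
        · rw [hbf] at h
          simp at h
      · simp [hany]
    · rw [hA1] at h
      simp only [if_true] at h ⊢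
      rcases hany : (bIndex args (posL pkl.toNat)).1.any
          (fun p => PySem.List.pyGet? fact p.1 != some p.2) with _ | _
      · rw [hany] at h
        simp only [Bool.false_eq_true, if_false] at h ⊢
        rcases hbf : (bFactTheta fact (bIndex args (posL pkl.toNat)).2).1 with _ | _
        · rw [hbf] at h
          simp at h
        · rw [hbf] at h
          simp only [if_true] at h ⊢
          rw [Option.some.injEq] at h
          rw [h]
      · rw [hany] at h
        simp at h
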